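-- pv_equiv track=rewrite | github.com/sunghj1118/algorithm | 백준/Silver/2468. 안전 영역/안전 영역.py | safeAreas
-- ===== SOURCE A (Python) =====
-- def safeAreas(grid, rain):
--     # base case
--     if not grid:
--         return 0
--
--     rows, cols = len(grid), len(grid[0])
--     safe_regions = 0
--     visited = [[False for _ in range(cols)] for _ in range(rows)]
--
--     def iter_dfs(start_i, start_j):
--         stack = [(start_i, start_j)]
--
--         while stack:
--             i,j = stack.pop()
--
--             # out of bounds
--             if i < 0 or i >= rows or j >= cols or j < 0:
--                 continue
--
--             visited[i][j] = True
--
--             # check four directions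
--             for ni,nj in [(i+1,j), (i-1,j), (i,j+1), (i,j-1)]:
--             # add unvisited and sinking tiles to stack
--                 if 0 <= ni < rows and 0 <= nj < cols and not visited[ni][nj] \
--                 and grid[ni][nj] > rain:
--                     stack.append((ni,nj))
--
--     for i in range(rows):
--         for j in range(cols):
--             if not visited[i][j] and grid[i][j] > rain:
--                 iter_dfs(i,j)
--                 safe_regions += 1
--
--
--     return safe_regions
-- ===== SOURCE B (Python) =====
-- def safeAreas(grid, rain):
--     if not grid:
--         return 0
--     rows, cols = len(grid), len(grid[0])
--     labels = {}
--     comps = {}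
--     for i in range(rows):
--         for j in range(cols):
--             if grid[i][j] > rain:
--                 labels[(i, j)] = (i, j)
--                 comps[(i, j)] = [(i, j)]
--     for i in range(rows):
--         for j in range(cols):
--             if (i, j) in labels:
--                 for n in ((i + 1, j), (i, j + 1)):
--                     if n in labels:
--                         la, lb = labels[(i, j)], labels[n]
--                         if la != lb:
--                             if len(comps[la]) < len(comps[lb]):
--                                 la, lb = lb, la
--                             for k in comps[lb]:
--                                 labels[k] = la
--                             comps[la].extend(comps[lb])
--                             del comps[lb]
--     return len(comps)
-- ===== Notes on version B (the rewrite author's own statement) =====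
-- stated objective: alternative
-- what changed: A's per-component iterative DFS flood fill (explicit stack + visited matrix) is replaced by a label-merging (weighted quick-union) pass: every safe cell starts as its own labelled bucket, each right/down edge between safe cells merges the smaller bucket into the larger, and the answer is the number of surviving buckets.
import Mathlib
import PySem

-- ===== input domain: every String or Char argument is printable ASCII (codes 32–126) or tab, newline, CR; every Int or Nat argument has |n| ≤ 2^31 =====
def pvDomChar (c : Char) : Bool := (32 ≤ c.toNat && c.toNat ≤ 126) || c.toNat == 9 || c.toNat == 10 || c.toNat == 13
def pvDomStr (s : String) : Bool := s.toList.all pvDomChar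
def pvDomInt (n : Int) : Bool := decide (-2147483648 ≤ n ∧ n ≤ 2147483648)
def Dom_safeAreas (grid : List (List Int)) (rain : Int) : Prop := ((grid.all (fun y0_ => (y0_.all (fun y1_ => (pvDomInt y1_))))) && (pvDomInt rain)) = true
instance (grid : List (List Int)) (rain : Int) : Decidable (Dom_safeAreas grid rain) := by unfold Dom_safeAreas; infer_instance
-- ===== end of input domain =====

-- B replaces A's per-component DFS flood fill by a label-merging (weighted quick-union) pass over
-- explicit right/down edges and returns the number of surviving component buckets (objective: alternative).

-- ===== PORT A =====
-- A's visited matrix, read/written at (possibly Int) indices that A only uses in bounds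
def pvGet2 (v : List (List Bool)) (i j : Int) : Bool := (v.getD i.toNat []).getD j.toNat false

def pvSet2 (v : List (List Bool)) (i j : Int) : List (List Bool) :=
  v.set i.toNat ((v.getD i.toNat []).set j.toNat true)

-- the four directions A probes, in A's order
def pvNbrs (c : Int × Int) : List (Int × Int) :=
  [(c.1 + 1, c.2), (c.1 - 1, c.2), (c.1, c.2 + 1), (c.1, c.2 - 1)]

-- A's `while stack:` loop (stack head = Python's list end); the fuel argument only makes the
-- loop structurally terminating, it is chosen large enough never to run out (see pvDfs_spec)
def pvDfs (g : List (List Int)) (r rows cols : Int) :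
    Nat → List (Int × Int) → List (List Bool) → List (List Bool)
  | 0, _, v => v
  | _ + 1, [], v => v
  | fuel + 1, c :: st, v =>
    if c.1 < 0 ∨ rows ≤ c.1 ∨ cols ≤ c.2 ∨ c.2 < 0 then
      pvDfs g r rows cols fuel st v
    else
      let v' := pvSet2 v c.1 c.2
      let ps := (pvNbrs c).filter (fun n =>
        decide (0 ≤ n.1) && decide (n.1 < rows) && decide (0 ≤ n.2) && decide (n.2 < cols)
        && !pvGet2 v' n.1 n.2 && decide (r < (g.getD n.1.toNat []).getD n.2.toNat 0))
      pvDfs g r rows cols fuel (ps.reverse ++ st) v'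

def safeAreas (grid : List (List Int)) (rain : Int) : Int :=
  if grid = [] then 0
  else
    let rows : Int := grid.length
    let cols : Int := (grid.headD []).length
    let v0 : List (List Bool) := List.replicate grid.length (List.replicate (grid.headD []).length false)
    let fin := (PySem.List.pyRange 0 rows 1).foldl (fun st i =>
      (PySem.List.pyRange 0 cols 1).foldl (fun (st : List (List Bool) × Int) j =>
        if !pvGet2 st.1 i j && decide (rain < (grid.getD i.toNat []).getD j.toNat 0) then
          (pvDfs grid rain rows cols (5 * grid.length * (grid.headD []).length + 2) [(i, j)] st.1,
           st.2 + 1)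
        else st) st) (v0, 0)
    fin.2

-- ===== PORT B =====
-- the two forward (right/down) neighbours B links
def pvNbrs2 (c : Int × Int) : List (Int × Int) := [(c.1 + 1, c.2), (c.1, c.2 + 1)]

-- B's body of `for n in ((i+1,j),(i,j+1)):` — merge the two labels, relabelling the smaller bucket
def pvMergeStep (lc : PySem.Dict (Int × Int) (Int × Int) × PySem.Dict (Int × Int) (List (Int × Int)))
    (c n : Int × Int) :
    PySem.Dict (Int × Int) (Int × Int) × PySem.Dict (Int × Int) (List (Int × Int)) :=
  if lc.1.contains n then
    let la := lc.1.getD c (0, 0)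
    let lb := lc.1.getD n (0, 0)
    if la ≠ lb then
      let p := if (lc.2.getD la []).length < (lc.2.getD lb []).length then (lb, la) else (la, lb)
      let labels' := (lc.2.getD p.2 []).foldl (fun d k => d.insert k p.1) lc.1
      let comps' := (lc.2.insert p.1 ((lc.2.getD p.1 []) ++ (lc.2.getD p.2 []))).erase p.2
      (labels', comps')
    else lc
  else lc

def safeAreas_alt (grid : List (List Int)) (rain : Int) : Int :=
  if grid = [] then 0
  else
    let rows : Int := grid.length
    let cols : Int := (grid.headD []).length
    let init := (PySem.List.pyRange 0 rows 1).foldl (fun lc i =>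
      (PySem.List.pyRange 0 cols 1).foldl
        (fun (lc : PySem.Dict (Int × Int) (Int × Int) × PySem.Dict (Int × Int) (List (Int × Int))) j =>
          if rain < (grid.getD i.toNat []).getD j.toNat 0 then
            (lc.1.insert (i, j) (i, j), lc.2.insert (i, j) [(i, j)])
          else lc) lc) (PySem.Dict.empty, PySem.Dict.empty)
    let fin := (PySem.List.pyRange 0 rows 1).foldl (fun lc i =>
      (PySem.List.pyRange 0 cols 1).foldl (fun lc j =>
        if lc.1.contains (i, j) then
          (pvNbrs2 (i, j)).foldl (fun lc n => pvMergeStep lc (i, j) n) lc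
        else lc) lc) init
    (fin.2.size : Int)

-- ===== PRECONDITION & SPEC =====
-- Pre_ excludes exactly the ragged grids on which the Python A raises IndexError
-- (a row shorter than the first row while the scan reads grid[i][j] for every j < len(grid[0])).
def Pre_safeAreas (grid : List (List Int)) (rain : Int) : Prop :=
  grid = [] ∨ ∀ row ∈ grid, (grid.headD []).length ≤ row.length

instance (grid : List (List Int)) (rain : Int) : Decidable (Pre_safeAreas grid rain) := by
  unfold Pre_safeAreas; infer_instance

def pvWitness_safeAreas : List (List Int) × Int := ([[1, 2], [0, 3]], 1)

def Spec_safeAreas (grid : List (List Int)) (rain : Int) (out : Int) : Prop := out = safeAreas_alt grid rain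
instance (grid : List (List Int)) (rain : Int) (out : Int) : Decidable (Spec_safeAreas grid rain out) := by unfold Spec_safeAreas; infer_instance

-- ===== CLAIM (what is proved, stated in full; the proofs are below) =====
def Claim_equal_safeAreas : Prop := ∀ (grid : List (List Int)) (rain : Int), Dom_safeAreas grid rain → Pre_safeAreas grid rain → Spec_safeAreas grid rain (safeAreas grid rain)

-- ===== LEMMAS AND PROOFS =====

-- ---- the common graph: safe cells and 4-adjacency ----
def colsN (g : List (List Int)) : Nat := (g.headD []).length

def safeB (g : List (List Int)) (r : Int) (c : Int × Int) : Bool :=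
  decide (0 ≤ c.1) && decide (c.1 < (g.length : Int)) && decide (0 ≤ c.2) &&
  decide (c.2 < (colsN g : Int)) && decide (r < (g.getD c.1.toNat []).getD c.2.toNat 0)

def inB (g : List (List Int)) (c : Int × Int) : Prop :=
  0 ≤ c.1 ∧ c.1 < (g.length : Int) ∧ 0 ≤ c.2 ∧ c.2 < (colsN g : Int)

def adjC (a b : Int × Int) : Prop :=
  b = (a.1 + 1, a.2) ∨ b = (a.1 - 1, a.2) ∨ b = (a.1, a.2 + 1) ∨ b = (a.1, a.2 - 1)

def EC (g : List (List Int)) (r : Int) (a b : Int × Int) : Prop :=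
  safeB g r a = true ∧ safeB g r b = true ∧ adjC a b

def Conn (g : List (List Int)) (r : Int) : (Int × Int) → (Int × Int) → Prop :=
  Relation.ReflTransGen (EC g r)

def cellsL (g : List (List Int)) : List (Int × Int) :=
  (PySem.List.pyRange 0 (g.length : Int) 1).flatMap
    (fun i => (PySem.List.pyRange 0 (colsN g : Int) 1).map (fun j => (i, j)))

def KsL (g : List (List Int)) (r : Int) : List (Int × Int) := (cellsL g).filter (safeB g r)

-- ---- A-side notions ----
def unvP (v : List (List Bool)) (c : Int × Int) : Prop := pvGet2 v c.1 c.2 = false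
def UvP (g : List (List Int)) (v : List (List Bool)) (c : Int × Int) : Prop :=
  inB g c ∧ pvGet2 v c.1 c.2 = true
def RavR (g : List (List Int)) (r : Int) (v : List (List Bool)) (a b : Int × Int) : Prop :=
  EC g r a b ∧ unvP v b
def MarkR (g : List (List Int)) (r : Int) (v : List (List Bool)) : (Int × Int) → (Int × Int) → Prop :=
  Relation.ReflTransGen (RavR g r v)
def ShapeV (g : List (List Int)) (v : List (List Bool)) : Prop :=
  v.length = g.length ∧ ∀ row ∈ v, row.length = colsN g
def NUnv (g : List (List Int)) (r : Int) (v : List (List Bool)) : Nat :=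
  ((cellsL g).filter (fun c => safeB g r c && !pvGet2 v c.1 c.2)).length
def KinvP (g : List (List Int)) (r : Int) (v : List (List Bool)) (S : List (Int × Int)) : Prop :=
  ∀ t c rst, S = t ++ c :: rst → pvGet2 v c.1 c.2 = true →
    ∀ d, EC g r c d → unvP v d → d ∈ t

-- ---- B-side notions ----
def RPrel (P : List ((Int × Int) × (Int × Int))) : (Int × Int) → (Int × Int) → Prop :=
  Relation.ReflTransGen (fun a b => (a, b) ∈ P ∨ (b, a) ∈ P)

def BinvP (g : List (List Int)) (r : Int) (P : List ((Int × Int) × (Int × Int)))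
    (lc : PySem.Dict (Int × Int) (Int × Int) × PySem.Dict (Int × Int) (List (Int × Int))) : Prop :=
  ∃ f : (Int × Int) → (Int × Int),
    lc.1.items = (KsL g r).map (fun k => (k, f k)) ∧
    lc.2.keys.Nodup ∧
    (∀ l, l ∈ lc.2.keys ↔ ∃ k, k ∈ KsL g r ∧ f k = l) ∧
    (∀ l x, l ∈ lc.2.keys → (x ∈ lc.2.getD l [] ↔ x ∈ KsL g r ∧ f x = l)) ∧
    (∀ l, l ∈ lc.2.keys → (lc.2.getD l []).Nodup) ∧
    (∀ x y, x ∈ KsL g r → y ∈ KsL g r → (f x = f y ↔ RPrel P x y))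

def edgesOf (g : List (List Int)) (r : Int) (L : List (Int × Int)) :
    List ((Int × Int) × (Int × Int)) :=
  L.flatMap (fun c => if safeB g r c then ((pvNbrs2 c).filter (safeB g r)).map (fun n => (c, n)) else [])

-- ---- basic facts ----
theorem mem_cellsL {g : List (List Int)} {c : Int × Int} : c ∈ cellsL g ↔ inB g c := by
  cases c with | mk i j =>
  simp only [cellsL, List.mem_flatMap, List.mem_map, PySem.List.mem_pyRange_one, inB]
  constructor
  · rintro ⟨i', hi', j', hj', h⟩
    obtain ⟨rfl, rfl⟩ : i' = i ∧ j' = j := by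
      constructor <;> [exact congrArg Prod.fst h; exact congrArg Prod.snd h]
    exact ⟨hi'.1, hi'.2, hj'.1, hj'.2⟩
  · rintro ⟨h1, h2, h3, h4⟩
    exact ⟨i, ⟨h1, h2⟩, j, ⟨h3, h4⟩, rfl⟩

theorem nodup_cellsL (g : List (List Int)) : (cellsL g).Nodup := by
  refine List.nodup_flatMap.2 ⟨fun i _ => ?_, ?_⟩
  · exact (PySem.List.nodup_pyRange_one _ _).map (fun a b h => congrArg Prod.snd h)
  · refine List.Pairwise.imp ?_ (PySem.List.nodup_pyRange_one 0 (g.length : Int))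
    intro a b hab
    intro x hx hy
    simp only [List.mem_map] at hx hy
    obtain ⟨ja, _, rfl⟩ := hx
    obtain ⟨jb, _, h⟩ := hy
    exact hab (congrArg Prod.fst h).symm

theorem safeB_iff {g : List (List Int)} {r : Int} {c : Int × Int} :
    safeB g r c = true ↔ inB g c ∧ r < (g.getD c.1.toNat []).getD c.2.toNat 0 := by
  simp only [safeB, inB, Bool.and_eq_true, decide_eq_true_eq]
  tauto

theorem mem_KsL {g : List (List Int)} {r : Int} {c : Int × Int} :
    c ∈ KsL g r ↔ safeB g r c = true := by
  simp only [KsL, List.mem_filter, mem_cellsL]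
  constructor
  · exact fun h => h.2
  · exact fun h => ⟨(safeB_iff.1 h).1, h⟩

theorem adjC_symm {a b : Int × Int} (h : adjC a b) : adjC b a := by
  cases a with | mk a1 a2 =>
  cases b with | mk b1 b2 =>
  simp only [adjC, Prod.mk.injEq] at h ⊢
  omega

theorem EC_symm {g : List (List Int)} {r : Int} : Symmetric (EC g r) := by
  rintro a b ⟨sa, sb, h⟩
  exact ⟨sb, sa, adjC_symm h⟩

theorem Conn_safe {g : List (List Int)} {r : Int} {a b : Int × Int}
    (ha : safeB g r a = true) (h : Conn g r a b) : safeB g r b = true := by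
  induction h with
  | refl => exact ha
  | tail _ hstep ih => exact hstep.2.1

theorem Conn_symm {g : List (List Int)} {r : Int} : Symmetric (Conn g r) := by
  exact Relation.ReflTransGen.symmetric (fun a b h => EC_symm h)

-- ---- generic relation lemmas ----
theorem rtg_congr {α : Type} {r s : α → α → Prop} (h : ∀ a b, r a b ↔ s a b) {x y : α} :
    Relation.ReflTransGen r x y ↔ Relation.ReflTransGen s x y := by
  constructor
  · exact Relation.ReflTransGen.mono (fun a b hab => (h a b).1 hab)
  · exact Relation.ReflTransGen.mono (fun a b hab => (h a b).2 hab)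

theorem rtg_remove_head {α : Type} {E' : α → α → Prop} {P : α → Prop} {e c : α}
    (h : Relation.ReflTransGen (fun a b => E' a b ∧ P b) e c) :
    c = e ∨ ∃ d, E' e d ∧ P d ∧ d ≠ e ∧
      Relation.ReflTransGen (fun a b => E' a b ∧ P b ∧ b ≠ e) d c := by
  induction h with
  | refl => exact Or.inl rfl
  | @tail b c hb hstep ih =>
    by_cases hce : c = e
    · exact Or.inl hce
    · rcases ih with rfl | ⟨d, h1, h2, h3, h4⟩
      · exact Or.inr ⟨c, hstep.1, hstep.2, hce, Relation.ReflTransGen.refl⟩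
      · exact Or.inr ⟨d, h1, h2, h3, h4.tail ⟨hstep.1, hstep.2, hce⟩⟩

theorem rtg_avoid {α : Type} {E' : α → α → Prop} {P : α → Prop} {e x c : α}
    (h : Relation.ReflTransGen (fun a b => E' a b ∧ P b) x c) :
    Relation.ReflTransGen (fun a b => E' a b ∧ P b ∧ b ≠ e) x c ∨
      Relation.ReflTransGen (fun a b => E' a b ∧ P b) e c := by
  induction h with
  | refl => exact Or.inl Relation.ReflTransGen.refl
  | @tail b c hb hstep ih =>
    rcases ih with h1 | h2
    · by_cases hce : c = e
      · subst hce; exact Or.inr Relation.ReflTransGen.refl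
      · exact Or.inl (h1.tail ⟨hstep.1, hstep.2, hce⟩)
    · exact Or.inr (h2.tail hstep)

-- ---- A-side: matrix lemmas ----
theorem shape_set2 {g : List (List Int)} {v : List (List Bool)} (hs : ShapeV g v) (a b : Int) :
    ShapeV g (pvSet2 v a b) := by
  obtain ⟨hv, hrows⟩ := hs
  by_cases ha : a.toNat < v.length
  · refine ⟨by simp [pvSet2, hv], ?_⟩
    intro row hrow
    rcases List.mem_or_eq_of_mem_set hrow with h | rfl
    · exact hrows _ h
    · rw [List.length_set, List.getD_eq_getElem _ _ ha]
      exact hrows _ (List.getElem_mem ha)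
  · rw [pvSet2, List.set_eq_of_length_le (by omega)]
    exact ⟨hv, hrows⟩

theorem get2_set2 {g : List (List Int)} {v : List (List Bool)} (hs : ShapeV g v)
    {a b : Int} (hab : inB g (a, b)) (i j : Int) (hij : inB g (i, j)) :
    pvGet2 (pvSet2 v a b) i j = if i = a ∧ j = b then true else pvGet2 v i j := by
  obtain ⟨hv, hrows⟩ := hs
  obtain ⟨ha0, ha1, hb0, hb1⟩ := hab
  obtain ⟨hi0, hi1, hj0, hj1⟩ := hij
  simp only at ha0 ha1 hb0 hb1 hi0 hi1 hj0 hj1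
  have haN : a.toNat < v.length := by omega
  have hrowA : (v.getD a.toNat []).length = colsN g := by
    rw [List.getD_eq_getElem _ _ haN]; exact hrows _ (List.getElem_mem haN)
  by_cases hia : i.toNat = a.toNat
  · have hIA : i = a := by omega
    have h1 : pvGet2 (pvSet2 v a b) i j
        = ((v.getD a.toNat []).set b.toNat true).getD j.toNat false := by
      rw [pvGet2, pvSet2]
      simp only [List.getD_eq_getElem?_getD, hia, List.getElem?_set_self haN]
      rfl
    by_cases hjb : j.toNat = b.toNat
    · have hJB : j = b := by omega
      rw [h1, hjb, List.getD_eq_getElem?_getD, List.getElem?_set_self (by omega)]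
      simp [hIA, hJB]
    · have hJB : ¬ (j = b) := by omega
      rw [h1, List.getD_eq_getElem?_getD, List.getElem?_set_ne (Ne.symm hjb)]
      rw [if_neg (by tauto), pvGet2, hIA]
      simp [List.getD_eq_getElem?_getD]
  · have hIA : ¬ (i = a) := by omega
    rw [pvGet2, pvSet2]
    simp only [List.getD_eq_getElem?_getD, List.getElem?_set_ne (Ne.symm hia)]
    rw [if_neg (by tauto), pvGet2]
    simp [List.getD_eq_getElem?_getD]

theorem filter_flip_one {l : List (Int × Int)} (hnd : l.Nodup) {p q : (Int × Int) → Bool}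
    {e : Int × Int} (he : e ∈ l) (hpe : p e = true) (hqe : q e = false)
    (hagree : ∀ x ∈ l, x ≠ e → p x = q x) :
    (l.filter q).length + 1 = (l.filter p).length := by
  induction l with
  | nil => cases he
  | cons a tl ih =>
    rcases List.mem_cons.1 he with rfl | hetl
    · have hq : ∀ x ∈ tl, q x = p x := by
        intro x hx
        exact (hagree x (List.mem_cons_of_mem _ hx)
          (fun hxe => (List.nodup_cons.1 hnd).1 (hxe ▸ hx))).symm
      rw [List.filter_cons, List.filter_cons, hpe, hqe]
      simp only [List.filter_congr hq]
      simp
    · have hne : a ≠ e := fun h => (List.nodup_cons.1 hnd).1 (h ▸ hetl)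
      have hpa : p a = q a := hagree a List.mem_cons_self hne
      have ihr := ih (List.nodup_cons.1 hnd).2 hetl
        (fun x hx hxe => hagree x (List.mem_cons_of_mem _ hx) hxe)
      rw [List.filter_cons, List.filter_cons, ← hpa]
      by_cases hpa' : p a = true <;> simp [hpa'] <;> omega

theorem NUnv_set2 {g : List (List Int)} {r : Int} {v : List (List Bool)} (hs : ShapeV g v)
    {c : Int × Int} (hc : safeB g r c = true) (hun : pvGet2 v c.1 c.2 = false) :
    NUnv g r (pvSet2 v c.1 c.2) + 1 = NUnv g r v := by
  have hin : inB g c := (safeB_iff.1 hc).1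
  have hin' : inB g (c.1, c.2) := by exact hin
  have hmem : c ∈ cellsL g := mem_cellsL.2 hin
  refine filter_flip_one (nodup_cellsL g) hmem ?_ ?_ ?_
  · simp [hc, hun]
  · have h2 : pvGet2 (pvSet2 v c.1 c.2) c.1 c.2 = true := by
      rw [get2_set2 hs hin' c.1 c.2 hin']
      simp
    simp [h2]
  · intro x hx hxe
    have hxin : inB g (x.1, x.2) := by exact mem_cellsL.1 hx
    rw [get2_set2 hs hin' x.1 x.2 hxin]
    have hne : ¬ (x.1 = c.1 ∧ x.2 = c.2) := by
      intro h
      exact hxe (Prod.ext h.1 h.2)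
    rw [if_neg hne]

theorem length_cellsL (g : List (List Int)) : (cellsL g).length = g.length * colsN g := by
  rw [cellsL, List.length_flatMap]
  have h2 : ((PySem.List.pyRange 0 (g.length : Int) 1).map
      (fun i => ((PySem.List.pyRange 0 (colsN g : Int) 1).map (fun j => (i, j))).length))
      = (PySem.List.pyRange 0 (g.length : Int) 1).map (fun _ => colsN g) := by
    refine List.map_congr_left (fun i _ => ?_)
    rw [List.length_map, PySem.List.length_pyRange_one]
    omega
  rw [h2, List.map_const', List.sum_replicate, PySem.List.length_pyRange_one, smul_eq_mul]
  have h3 : (((g.length : Int)) - 0).toNat = g.length := by omega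
  rw [h3]

theorem NUnv_le (g : List (List Int)) (r : Int) (v : List (List Bool)) :
    NUnv g r v ≤ g.length * colsN g := by
  calc NUnv g r v ≤ (cellsL g).length := List.length_filter_le _ _
  _ = g.length * colsN g := length_cellsL g

-- ---- A-side: the DFS lemma ----
theorem mem_ps {g : List (List Int)} {r : Int} {v' : List (List Bool)} {c n : Int × Int}
    (hc : safeB g r c = true) :
    (n ∈ (pvNbrs c).filter (fun n =>
        decide (0 ≤ n.1) && decide (n.1 < (g.length : Int)) && decide (0 ≤ n.2) &&
        decide (n.2 < ((colsN g) : Int)) && !pvGet2 v' n.1 n.2 &&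
        decide (r < (g.getD n.1.toNat []).getD n.2.toNat 0))) ↔
      (EC g r c n ∧ unvP v' n) := by
  have hc' := safeB_iff.1 hc
  simp only [inB] at hc'
  simp only [List.mem_filter, pvNbrs, List.mem_cons, List.not_mem_nil, or_false,
    Bool.and_eq_true, decide_eq_true_eq, Bool.not_eq_true', EC, adjC, unvP, safeB_iff, inB]
  tauto

theorem pvDfs_spec {g : List (List Int)} {r : Int} :
    ∀ (fuel : Nat) (S : List (Int × Int)) (v : List (List Bool)),
      ShapeV g v →
      (∀ e ∈ S, safeB g r e = true) →
      KinvP g r v S →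
      5 * NUnv g r v + S.length + 1 ≤ fuel →
      ShapeV g (pvDfs g r (g.length : Int) (colsN g : Int) fuel S v) ∧
      (∀ c, UvP g (pvDfs g r (g.length : Int) (colsN g : Int) fuel S v) c ↔
        UvP g v c ∨ ∃ x ∈ S, MarkR g r v x c) := by
  intro fuel
  induction fuel with
  | zero => intro S v _ _ _ hfuel; omega
  | succ fuel IH =>
    intro S v hsh hsafe hK hfuel
    match S with
    | [] =>
      refine ⟨hsh, fun z => ?_⟩
      simp [pvDfs]
    | c :: st =>
      have hcsafe : safeB g r c = true := hsafe c List.mem_cons_self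
      have hcin : inB g c := (safeB_iff.1 hcsafe).1
      have hcin' : inB g (c.1, c.2) := hcin
      obtain ⟨hc1, hc2, hc3, hc4⟩ := hcin
      have hOOB : ¬ (c.1 < 0 ∨ (g.length : Int) ≤ c.1 ∨ ((colsN g) : Int) ≤ c.2 ∨ c.2 < 0) := by
        push_neg
        exact ⟨by omega, by omega, by omega, by omega⟩
      have hsh' : ShapeV g (pvSet2 v c.1 c.2) := shape_set2 hsh c.1 c.2
      have hg2 : ∀ z : Int × Int, inB g z →
          pvGet2 (pvSet2 v c.1 c.2) z.1 z.2
            = if z = c then true else pvGet2 v z.1 z.2 := by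
        intro z hz
        have hz' : inB g (z.1, z.2) := hz
        rw [get2_set2 hsh hcin' z.1 z.2 hz']
        by_cases hzc : z = c
        · rw [if_pos (by rw [hzc]; exact ⟨rfl, rfl⟩), if_pos hzc]
        · rw [if_neg (by intro h; exact hzc (Prod.ext h.1 h.2)), if_neg hzc]
      have hunv' : ∀ z : Int × Int, inB g z →
          (unvP (pvSet2 v c.1 c.2) z ↔ z ≠ c ∧ unvP v z) := by
        intro z hz
        unfold unvP
        rw [hg2 z hz]
        by_cases hzc : z = c <;> simp [hzc]
      have hRavIff : ∀ a b, RavR g r (pvSet2 v c.1 c.2) a b ↔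
          ((fun a b => EC g r a b ∧ unvP v b ∧ b ≠ c) a b) := by
        intro a b
        simp only [RavR]
        constructor
        · rintro ⟨hE, hu⟩
          have hb := (hunv' b (safeB_iff.1 hE.2.1).1).1 hu
          exact ⟨hE, hb.2, hb.1⟩
        · rintro ⟨hE, hu, hbc⟩
          exact ⟨hE, (hunv' b (safeB_iff.1 hE.2.1).1).2 ⟨hbc, hu⟩⟩
      have hMarkIff : ∀ x z, MarkR g r (pvSet2 v c.1 c.2) x z ↔
          Relation.ReflTransGen (fun a b => EC g r a b ∧ unvP v b ∧ b ≠ c) x z := by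
        intro x z; exact rtg_congr hRavIff
      have hMarkMono : ∀ x z, MarkR g r (pvSet2 v c.1 c.2) x z → MarkR g r v x z := by
        intro x z h
        refine Relation.ReflTransGen.mono ?_ ((hMarkIff x z).1 h)
        rintro a b ⟨hE, hu, _⟩; exact ⟨hE, hu⟩
      have hstep : pvDfs g r (g.length : Int) (colsN g : Int) (fuel + 1) (c :: st) v
          = pvDfs g r (g.length : Int) (colsN g : Int) fuel
              (((pvNbrs c).filter (fun n =>
                decide (0 ≤ n.1) && decide (n.1 < (g.length : Int)) && decide (0 ≤ n.2) &&
                decide (n.2 < ((colsN g) : Int)) && !pvGet2 (pvSet2 v c.1 c.2) n.1 n.2 &&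
                decide (r < (g.getD n.1.toNat []).getD n.2.toNat 0))).reverse ++ st)
              (pvSet2 v c.1 c.2) := by
        rw [pvDfs, if_neg hOOB]
      set ps := (pvNbrs c).filter (fun n =>
          decide (0 ≤ n.1) && decide (n.1 < (g.length : Int)) && decide (0 ≤ n.2) &&
          decide (n.2 < ((colsN g) : Int)) && !pvGet2 (pvSet2 v c.1 c.2) n.1 n.2 &&
          decide (r < (g.getD n.1.toNat []).getD n.2.toNat 0)) with hps
      have hps_mem : ∀ n, n ∈ ps ↔ (EC g r c n ∧ unvP (pvSet2 v c.1 c.2) n) := by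
        intro n; rw [hps]; exact mem_ps hcsafe
      by_cases hvc : pvGet2 v c.1 c.2 = true
      · -- visited pop: pushes nothing
        have hpse : ps = [] := by
          rw [List.eq_nil_iff_forall_not_mem]
          intro n hn
          obtain ⟨hE, hu⟩ := (hps_mem n).1 hn
          have hnin : inB g n := (safeB_iff.1 hE.2.1).1
          have := (hunv' n hnin).1 hu
          exact List.not_mem_nil (hK [] c st rfl hvc n hE this.2)
        have hNU : NUnv g r (pvSet2 v c.1 c.2) = NUnv g r v := by
          unfold NUnv
          refine congrArg List.length (List.filter_congr ?_)
          intro x hx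
          rw [hg2 x (mem_cellsL.1 hx)]
          by_cases hxc : x = c
          · subst hxc; simp [hvc]
          · rw [if_neg hxc]
        have hK' : KinvP g r (pvSet2 v c.1 c.2) st := by
          intro t c' rst hdec hvis d hE hu
          have hc'in : inB g c' := by
            have : c' ∈ st := by rw [hdec]; exact List.mem_append_right _ List.mem_cons_self
            exact (safeB_iff.1 (hsafe c' (List.mem_cons_of_mem _ this))).1
          have hdin : inB g d := (safeB_iff.1 hE.2.1).1
          have hvisv : pvGet2 v c'.1 c'.2 = true := by
            rw [hg2 c' hc'in] at hvis
            by_cases hc'c : c' = c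
            · rw [hc'c]; exact hvc
            · rwa [if_neg hc'c] at hvis
          have hud := (hunv' d hdin).1 hu
          have := hK (c :: t) c' rst (by rw [hdec]; rfl) hvisv d hE hud.2
          rcases List.mem_cons.1 this with h | h
          · exact absurd h hud.1
          · exact h
        have hIH := IH st (pvSet2 v c.1 c.2) hsh'
          (fun e he => hsafe e (List.mem_cons_of_mem _ he)) hK'
          (by rw [hNU]; simp only [List.length_cons] at hfuel; omega)
        rw [hstep, hpse]
        simp only [List.reverse_nil, List.nil_append]
        refine ⟨hIH.1, fun z => ?_⟩
        rw [hIH.2 z]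
        have hUv' : UvP g (pvSet2 v c.1 c.2) z ↔ UvP g v z := by
          unfold UvP
          by_cases hz : inB g z
          · rw [hg2 z hz]
            by_cases hzc : z = c
            · subst hzc; simp [hvc, hz]
            · rw [if_neg hzc]
          · tauto
        have hMc : ∀ z', MarkR g r v c z' → z' = c := by
          intro z' h
          rcases rtg_remove_head (E' := EC g r) (P := unvP v) h with h | ⟨d, hE, hu, _, _⟩
          · exact h
          · exact absurd (hK [] c st rfl hvc d hE hu) List.not_mem_nil
        constructor
        · rintro (h | ⟨x, hx, hm⟩)
          · exact Or.inl (hUv'.1 h)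
          · exact Or.inr ⟨x, List.mem_cons_of_mem _ hx, hMarkMono x z hm⟩
        · rintro (h | ⟨x, hx, hm⟩)
          · exact Or.inl (hUv'.2 h)
          · rcases List.mem_cons.1 hx with rfl | hx'
            · have := hMc z hm
              subst this
              exact Or.inl (hUv'.2 ⟨hcin', hvc⟩)
            · rcases rtg_avoid (E' := EC g r) (P := unvP v) (e := c) hm with h1 | h2
              · exact Or.inr ⟨x, hx', (hMarkIff x z).2 h1⟩
              · have := hMc z h2
                subst this
                exact Or.inl (hUv'.2 ⟨hcin', hvc⟩)
      · -- unvisited pop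
        have hvcf : pvGet2 v c.1 c.2 = false := by
          cases h : pvGet2 v c.1 c.2
          · rfl
          · exact absurd h hvc
        have hNU : NUnv g r (pvSet2 v c.1 c.2) + 1 = NUnv g r v :=
          NUnv_set2 hsh hcsafe hvcf
        have hpslen : ps.length ≤ 4 := by
          calc ps.length ≤ (pvNbrs c).length := List.length_filter_le _ _
          _ = 4 := rfl
        have hsafe' : ∀ e ∈ ps.reverse ++ st, safeB g r e = true := by
          intro e he
          rcases List.mem_append.1 he with h | h
          · exact ((hps_mem e).1 (List.mem_reverse.1 h)).1.2.1
          · exact hsafe e (List.mem_cons_of_mem _ h)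
        have hK' : KinvP g r (pvSet2 v c.1 c.2) (ps.reverse ++ st) := by
          intro t c' rst hdec hvis d hE hu
          have hdin : inB g d := (safeB_iff.1 hE.2.1).1
          have hud := (hunv' d hdin).1 hu
          have hc'safe : safeB g r c' = true := hsafe' c' (by
            rw [hdec]; exact List.mem_append_right _ List.mem_cons_self)
          have hc'in : inB g c' := (safeB_iff.1 hc'safe).1
          rcases (List.append_eq_append_iff.1 hdec) with ⟨a', ha1, ha2⟩ | ⟨c'', hc1', hc2'⟩
          · -- t = ps.reverse ++ a', st = a' ++ c' :: rst  (c' inside st)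
            have hstdec : c :: st = (c :: a') ++ c' :: rst := by rw [ha2]; rfl
            by_cases hc'c : c' = c
            · subst hc'c
              have hdps : d ∈ ps := (hps_mem d).2 ⟨hE, (hunv' d hdin).2 hud⟩
              rw [ha1]
              exact List.mem_append_left _ (List.mem_reverse.2 hdps)
            · have hvisv : pvGet2 v c'.1 c'.2 = true := by
                rw [hg2 c' hc'in] at hvis
                rwa [if_neg hc'c] at hvis
              have hin2 := hK (c :: a') c' rst hstdec hvisv d hE hud.2
              rcases List.mem_cons.1 hin2 with h | h
              · exact absurd h hud.1
              · rw [ha1]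
                exact List.mem_append_right _ h
          · -- ps.reverse = t ++ c'', c' :: rst = c'' ++ st
            match c'', hc1', hc2' with
            | [], hc1', hc2' =>
              have hst : st = c' :: rst := (by simpa using hc2' : c' :: rst = st).symm
              have hstdec : c :: st = [c] ++ c' :: rst := by rw [hst]; rfl
              by_cases hc'c : c' = c
              · subst hc'c
                have hdps : d ∈ ps := (hps_mem d).2 ⟨hE, (hunv' d hdin).2 hud⟩
                have ht : t = ps.reverse := (by simpa using hc1' : ps.reverse = t).symm
                rw [ht]
                exact List.mem_reverse.2 hdps
              · have hvisv : pvGet2 v c'.1 c'.2 = true := by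
                  rw [hg2 c' hc'in] at hvis
                  rwa [if_neg hc'c] at hvis
                have hin2 := hK [c] c' rst hstdec hvisv d hE hud.2
                rcases List.mem_cons.1 hin2 with h | h
                · exact absurd h hud.1
                · exact absurd h List.not_mem_nil
            | e'' :: tl, hc1', hc2' =>
              have he : c' = e'' := (List.cons_eq_cons.1 hc2').1
              have hc'mem : c' ∈ ps.reverse := by
                rw [hc1', he]
                exact List.mem_append_right _ List.mem_cons_self
              have hups := ((hps_mem c').1 (List.mem_reverse.1 hc'mem)).2
              rw [unvP] at hups
              rw [hups] at hvis
              exact absurd hvis (by simp)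
        have hIH := IH (ps.reverse ++ st) (pvSet2 v c.1 c.2) hsh' hsafe' hK'
          (by
            rw [List.length_append, List.length_reverse]
            simp only [List.length_cons] at hfuel
            omega)
        rw [hstep]
        refine ⟨hIH.1, fun z => ?_⟩
        rw [hIH.2 z]
        have hUv' : ∀ z, UvP g (pvSet2 v c.1 c.2) z ↔ z = c ∨ UvP g v z := by
          intro z
          unfold UvP
          by_cases hz : inB g z
          · rw [hg2 z hz]
            by_cases hzc : z = c
            · subst hzc; simp [hz]
            · simp [hzc]
          · constructor
            · rintro ⟨h, _⟩; exact absurd h hz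
            · rintro (rfl | ⟨h, _⟩)
              · exact absurd hcin' hz
              · exact absurd h hz
        have hMcIff : ∀ z, MarkR g r v c z ↔ (z = c ∨ ∃ d ∈ ps, MarkR g r (pvSet2 v c.1 c.2) d z) := by
          intro z
          constructor
          · intro h
            rcases rtg_remove_head (E' := EC g r) (P := unvP v) h with h | ⟨d, hE, hu, hdc, hrtg⟩
            · exact Or.inl h
            · refine Or.inr ⟨d, ?_, ?_⟩
              · refine (hps_mem d).2 ⟨hE, ?_⟩
                exact (hunv' d (safeB_iff.1 hE.2.1).1).2 ⟨hdc, hu⟩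
              · exact (hMarkIff d z).2 hrtg
          · rintro (rfl | ⟨d, hd, hm⟩)
            · exact Relation.ReflTransGen.refl
            · obtain ⟨hE, hu⟩ := (hps_mem d).1 hd
              have hdin : inB g d := (safeB_iff.1 hE.2.1).1
              have hud := (hunv' d hdin).1 hu
              exact Relation.ReflTransGen.trans
                (Relation.ReflTransGen.single ⟨hE, hud.2⟩) (hMarkMono d z hm)
        constructor
        · rintro (h | ⟨x, hx, hm⟩)
          · rcases (hUv' z).1 h with rfl | h'
            · exact Or.inr ⟨z, List.mem_cons_self, Relation.ReflTransGen.refl⟩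
            · exact Or.inl h'
          · rcases List.mem_append.1 hx with h' | h'
            · exact Or.inr ⟨c, List.mem_cons_self,
                (hMcIff z).2 (Or.inr ⟨x, List.mem_reverse.1 h', hm⟩)⟩
            · exact Or.inr ⟨x, List.mem_cons_of_mem _ h', hMarkMono x z hm⟩
        · rintro (h | ⟨x, hx, hm⟩)
          · exact Or.inl ((hUv' z).2 (Or.inr h))
          · rcases List.mem_cons.1 hx with rfl | hx'
            · rcases (hMcIff z).1 hm with rfl | ⟨d, hd, hm'⟩
              · exact Or.inl ((hUv' z).2 (Or.inl rfl))
              · exact Or.inr ⟨d, List.mem_append_left _ (List.mem_reverse.2 hd), hm'⟩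
            · rcases rtg_avoid (E' := EC g r) (P := unvP v) (e := c) hm with h1 | h2
              · exact Or.inr ⟨x, List.mem_append_right _ hx', (hMarkIff x z).2 h1⟩
              · rcases (hMcIff z).1 h2 with rfl | ⟨d, hd, hm'⟩
                · exact Or.inl ((hUv' z).2 (Or.inl rfl))
                · exact Or.inr ⟨d, List.mem_append_left _ (List.mem_reverse.2 hd), hm'⟩

-- ---- A-side: the scan ----
def IscanP (g : List (List Int)) (r : Int) (φ : (Int × Int) → (Int × Int))
    (pfx : List (Int × Int)) (st : List (List Bool) × Int) : Prop :=
  ShapeV g st.1 ∧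
  (∀ c, UvP g st.1 c ↔ ∃ d ∈ pfx, safeB g r d = true ∧ Conn g r d c) ∧
  st.2 = (((pfx.filter (safeB g r)).map φ).toFinset.card : Int)

theorem scan_step {g : List (List Int)} {r : Int} {φ : (Int × Int) → (Int × Int)}
    (hφ : ∀ x y, safeB g r x = true → safeB g r y = true → (φ x = φ y ↔ Conn g r x y))
    {pfx : List (Int × Int)} {st : List (List Bool) × Int} {c : Int × Int}
    (hc : c ∈ cellsL g) (hI : IscanP g r φ pfx st) :
    IscanP g r φ (pfx ++ [c])
      (if !pvGet2 st.1 c.1 c.2 && decide (r < (g.getD c.1.toNat []).getD c.2.toNat 0) then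
        (pvDfs g r (g.length : Int) (colsN g : Int) (5 * g.length * colsN g + 2) [c] st.1, st.2 + 1)
      else st) := by
  obtain ⟨hsh, hUv, hcnt⟩ := hI
  have hcin : inB g c := mem_cellsL.1 hc
  by_cases hcond : (!pvGet2 st.1 c.1 c.2 && decide (r < (g.getD c.1.toNat []).getD c.2.toNat 0)) = true
  · rw [if_pos hcond]
    simp only [Bool.and_eq_true, Bool.not_eq_true', decide_eq_true_eq] at hcond
    obtain ⟨hvcf, hval⟩ := hcond
    have hcsafe : safeB g r c = true := safeB_iff.2 ⟨hcin, hval⟩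
    have hKinit : KinvP g r st.1 [c] := by
      intro t c' rst hdec hvis d hE hu
      match t, hdec with
      | [], hdec =>
        have : c' = c := (List.cons_eq_cons.1 hdec).1.symm
        subst this
        rw [hvis] at hvcf
        cases hvcf
      | x :: xs, hdec =>
        have := congrArg List.length hdec
        simp at this
    have hspec := pvDfs_spec (g := g) (r := r) (5 * g.length * colsN g + 2) [c] st.1 hsh
      (by intro e he; rw [List.mem_singleton] at he; rw [he]; exact hcsafe)
      hKinit
      (by
        have h1 := NUnv_le g r st.1
        have h2 : 5 * NUnv g r st.1 ≤ 5 * (g.length * colsN g) := Nat.mul_le_mul_left _ h1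
        simp only [List.length_cons, List.length_nil]
        rw [Nat.mul_assoc]
        omega)
    have hdisj : ∀ x, Conn g r c x → unvP st.1 x := by
      intro x hcx
      have hxsafe := Conn_safe hcsafe hcx
      unfold unvP
      by_contra hbad
      have hxvis : pvGet2 st.1 x.1 x.2 = true := by
        cases hx : pvGet2 st.1 x.1 x.2
        · exact absurd hx hbad
        · rfl
      obtain ⟨d, hd, hds, hdconn⟩ := (hUv x).1 ⟨(safeB_iff.1 hxsafe).1, hxvis⟩
      have : Conn g r d c := Relation.ReflTransGen.trans hdconn (Conn_symm hcx)
      have := (hUv c).2 ⟨d, hd, hds, this⟩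
      rw [this.2] at hvcf
      cases hvcf
    have hMC : ∀ z, MarkR g r st.1 c z ↔ Conn g r c z := by
      intro z
      constructor
      · exact Relation.ReflTransGen.mono (fun a b hab => hab.1)
      · intro h
        induction h with
        | refl => exact Relation.ReflTransGen.refl
        | @tail b z hb hstep ih =>
          exact ih.tail ⟨hstep, hdisj z (hb.tail hstep)⟩
    refine ⟨hspec.1, ?_, ?_⟩
    · intro z
      rw [hspec.2 z]
      constructor
      · rintro (h | ⟨x, hx, hm⟩)
        · obtain ⟨d, hd, hds, hdc⟩ := (hUv z).1 h
          exact ⟨d, List.mem_append_left _ hd, hds, hdc⟩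
        · rcases List.mem_cons.1 hx with rfl | h'
          · exact ⟨x, List.mem_append_right _ List.mem_cons_self, hcsafe, (hMC z).1 hm⟩
          · cases h'
      · rintro ⟨d, hd, hds, hdc⟩
        rcases List.mem_append.1 hd with h | h
        · exact Or.inl ((hUv z).2 ⟨d, h, hds, hdc⟩)
        · rcases List.mem_cons.1 h with rfl | h'
          · exact Or.inr ⟨d, List.mem_cons_self, (hMC z).2 hdc⟩
          · cases h'
    · simp only [List.filter_append, List.filter_cons, hcsafe, List.filter_nil, List.map_append,
        List.map_cons, List.map_nil, List.toFinset_append, List.toFinset_cons, List.toFinset_nil,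
        if_true]
      have hnot : φ c ∉ ((pfx.filter (safeB g r)).map φ).toFinset := by
        intro hmem
        rw [List.mem_toFinset, List.mem_map] at hmem
        obtain ⟨y, hy, hyc⟩ := hmem
        have hy' := List.mem_filter.1 hy
        have : Conn g r y c := (hφ y c hy'.2 hcsafe).1 hyc
        have := (hUv c).2 ⟨y, hy'.1, hy'.2, this⟩
        rw [this.2] at hvcf
        cases hvcf
      rw [hcnt]
      have : ((pfx.filter (safeB g r)).map φ).toFinset ∪ insert (φ c) ∅
          = insert (φ c) ((pfx.filter (safeB g r)).map φ).toFinset := by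
        ext a
        simp only [Finset.mem_union, Finset.mem_insert, Finset.notMem_empty, or_false]
        tauto
      rw [this, Finset.card_insert_of_notMem hnot]
      push_cast
      ring
  · rw [if_neg hcond]
    refine ⟨hsh, ?_, ?_⟩
    · intro z
      rw [hUv z]
      constructor
      · rintro ⟨d, hd, hds, hdc⟩
        exact ⟨d, List.mem_append_left _ hd, hds, hdc⟩
      · rintro ⟨d, hd, hds, hdc⟩
        rcases List.mem_append.1 hd with h | h
        · exact ⟨d, h, hds, hdc⟩
        · rcases List.mem_cons.1 h with heq | h'
          · -- d = c : c must be visited (cond false and safe)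
            rw [heq] at hds hdc
            have hval : r < (g.getD c.1.toNat []).getD c.2.toNat 0 := (safeB_iff.1 hds).2
            have hvis : pvGet2 st.1 c.1 c.2 = true := by
              cases hx : pvGet2 st.1 c.1 c.2
              · exfalso
                apply hcond
                rw [hx]
                simp only [Bool.not_false, Bool.true_and]
                exact decide_eq_true hval
              · rfl
            obtain ⟨d', hd', hds', hdc'⟩ := (hUv c).1 ⟨hcin, hvis⟩
            exact ⟨d', hd', hds', Relation.ReflTransGen.trans hdc' hdc⟩
          · cases h'
    · by_cases hcsafe : safeB g r c = true
      · -- safe but visited: φ c already present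
        have hval : r < (g.getD c.1.toNat []).getD c.2.toNat 0 := (safeB_iff.1 hcsafe).2
        have hvis : pvGet2 st.1 c.1 c.2 = true := by
          cases hx : pvGet2 st.1 c.1 c.2
          · exfalso
            apply hcond
            rw [hx]
            simp only [Bool.not_false, Bool.true_and]
            exact decide_eq_true hval
          · rfl
        obtain ⟨d, hd, hds, hdc⟩ := (hUv c).1 ⟨hcin, hvis⟩
        have hmem : φ c ∈ ((pfx.filter (safeB g r)).map φ).toFinset := by
          rw [List.mem_toFinset, List.mem_map]
          exact ⟨d, List.mem_filter.2 ⟨hd, hds⟩, (hφ d c hds hcsafe).2 hdc⟩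
        simp only [List.filter_append, List.filter_cons, hcsafe, List.filter_nil, List.map_append,
          List.map_cons, List.map_nil, List.toFinset_append, List.toFinset_cons, List.toFinset_nil,
        if_true]
        rw [hcnt]
        congr 1
        have : ((pfx.filter (safeB g r)).map φ).toFinset ∪ insert (φ c) ∅
            = insert (φ c) ((pfx.filter (safeB g r)).map φ).toFinset := by
          ext a
          simp only [Finset.mem_union, Finset.mem_insert, Finset.notMem_empty, or_false]
          tauto
        rw [this, Finset.insert_eq_self.2 hmem]
      · have hcsafe' : safeB g r c = false := by
          cases hx : safeB g r c
          · rfl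
          · exact absurd hx hcsafe
        simp only [List.filter_append, List.filter_cons, hcsafe', Bool.false_eq_true, if_false,
          List.filter_nil, List.append_nil]
        exact hcnt

theorem scan_go {g : List (List Int)} {r : Int} {φ : (Int × Int) → (Int × Int)}
    (hφ : ∀ x y, safeB g r x = true → safeB g r y = true → (φ x = φ y ↔ Conn g r x y)) :
    ∀ (l pfx : List (Int × Int)) (st : List (List Bool) × Int),
      cellsL g = pfx ++ l → IscanP g r φ pfx st →
      IscanP g r φ (pfx ++ l)
        (l.foldl (fun st c =>
          if !pvGet2 st.1 c.1 c.2 && decide (r < (g.getD c.1.toNat []).getD c.2.toNat 0) then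
            (pvDfs g r (g.length : Int) (colsN g : Int) (5 * g.length * colsN g + 2) [c] st.1,
             st.2 + 1)
          else st) st) := by
  intro l
  induction l with
  | nil => intro pfx st _ hI; simpa using hI
  | cons c tl ih =>
    intro pfx st hdec hI
    have hc : c ∈ cellsL g := by
      rw [hdec]
      exact List.mem_append_right _ List.mem_cons_self
    have h1 := scan_step hφ hc hI
    have h2 := ih (pfx ++ [c]) _ (by rw [hdec]; simp) h1
    simpa using h2

theorem get2_replicate (g : List (List Int)) (i j : Int) :
    pvGet2 (List.replicate g.length (List.replicate (colsN g) false)) i j = false := by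
  unfold pvGet2
  rw [show (List.replicate g.length (List.replicate (colsN g) false)).getD i.toNat []
      = ((List.replicate g.length (List.replicate (colsN g) false))[i.toNat]?).getD [] from
      List.getD_eq_getElem?_getD, List.getElem?_replicate]
  by_cases h : i.toNat < g.length
  · rw [if_pos h, Option.getD_some, List.getD_eq_getElem?_getD, List.getElem?_replicate]
    by_cases h2 : j.toNat < colsN g
    · rw [if_pos h2]
      rfl
    · rw [if_neg h2]
      rfl
  · rw [if_neg h]
    rfl

theorem safeAreas_eq_card {g : List (List Int)} {r : Int} (hg : g ≠ [])
    {φ : (Int × Int) → (Int × Int)}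
    (hφ : ∀ x y, safeB g r x = true → safeB g r y = true → (φ x = φ y ↔ Conn g r x y)) :
    safeAreas g r = ((((KsL g r).map φ).toFinset.card : Int)) := by
  have hI0 : IscanP g r φ []
      (List.replicate g.length (List.replicate (colsN g) false), 0) := by
    refine ⟨⟨by simp, ?_⟩, ?_, by simp⟩
    · intro row hrow
      rw [List.eq_of_mem_replicate hrow]
      simp
    · intro z
      simp only [List.not_mem_nil, false_and, exists_false, iff_false]
      rintro ⟨_, hz⟩
      rw [get2_replicate] at hz
      cases hz
  have hmain := scan_go hφ (cellsL g) [] _ (by simp) hI0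
  rw [List.nil_append] at hmain
  have hfold : safeAreas g r
      = ((cellsL g).foldl (fun st c =>
          if !pvGet2 st.1 c.1 c.2 && decide (r < (g.getD c.1.toNat []).getD c.2.toNat 0) then
            (pvDfs g r (g.length : Int) (colsN g : Int) (5 * g.length * colsN g + 2) [c] st.1,
             st.2 + 1)
          else st) (List.replicate g.length (List.replicate (colsN g) false), 0)).2 := by
    rw [safeAreas, if_neg hg]
    rw [cellsL, List.foldl_flatMap]
    simp only [List.foldl_map]
    rfl
  rw [hfold, hmain.2.2]
  rfl

-- ---- B-side lemmas ----
theorem rp_symm {P : List ((Int × Int) × (Int × Int))} : Symmetric (RPrel P) := by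
  exact Relation.ReflTransGen.symmetric (fun a b h => h.symm)

theorem rp_base_snoc {P : List ((Int × Int) × (Int × Int))} {c n a b : Int × Int} :
    ((a, b) ∈ P ++ [(c, n)] ∨ (b, a) ∈ P ++ [(c, n)]) ↔
      (((a, b) ∈ P ∨ (b, a) ∈ P) ∨ (a = c ∧ b = n) ∨ (a = n ∧ b = c)) := by
  simp only [List.mem_append, List.mem_singleton, Prod.mk.injEq]
  tauto

theorem rp_snoc {P : List ((Int × Int) × (Int × Int))} {c n x y : Int × Int} :
    RPrel (P ++ [(c, n)]) x y ↔
      RPrel P x y ∨ (RPrel P x c ∧ RPrel P n y) ∨ (RPrel P x n ∧ RPrel P c y) := by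
  constructor
  · intro h
    induction h with
    | refl => exact Or.inl Relation.ReflTransGen.refl
    | @tail b y hb hstep ih =>
      rcases rp_base_snoc.1 hstep with hold | ⟨rfl, rfl⟩ | ⟨rfl, rfl⟩
      · rcases ih with h1 | ⟨h1, h2⟩ | ⟨h1, h2⟩
        · exact Or.inl (h1.tail hold)
        · exact Or.inr (Or.inl ⟨h1, h2.tail hold⟩)
        · exact Or.inr (Or.inr ⟨h1, h2.tail hold⟩)
      · rcases ih with h1 | ⟨h1, h2⟩ | ⟨h1, h2⟩
        · exact Or.inr (Or.inl ⟨h1, Relation.ReflTransGen.refl⟩)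
        · exact Or.inr (Or.inl ⟨h1, Relation.ReflTransGen.refl⟩)
        · exact Or.inl h1
      · rcases ih with h1 | ⟨h1, h2⟩ | ⟨h1, h2⟩
        · exact Or.inr (Or.inr ⟨h1, Relation.ReflTransGen.refl⟩)
        · exact Or.inl h1
        · exact Or.inr (Or.inr ⟨h1, Relation.ReflTransGen.refl⟩)
  · have hmono : ∀ {u w : Int × Int}, RPrel P u w → RPrel (P ++ [(c, n)]) u w := by
      intro u w h
      exact Relation.ReflTransGen.mono (fun a b hab => by
        rcases hab with h1 | h1
        · exact Or.inl (List.mem_append_left _ h1)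
        · exact Or.inr (List.mem_append_left _ h1)) h
    rintro (h | ⟨h1, h2⟩ | ⟨h1, h2⟩)
    · exact hmono h
    · exact Relation.ReflTransGen.trans
        ((hmono h1).tail (Or.inl (List.mem_append_right _ List.mem_cons_self))) (hmono h2)
    · exact Relation.ReflTransGen.trans
        ((hmono h1).tail (Or.inr (List.mem_append_right _ List.mem_cons_self))) (hmono h2)

theorem rp_nil {x y : Int × Int} : RPrel [] x y ↔ x = y := by
  constructor
  · intro h
    induction h with
    | refl => rfl
    | tail _ hstep _ => simp at hstep
  · rintro rfl
    exact Relation.ReflTransGen.refl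

theorem foldl_insert_items {κ ν : Type} [BEq κ] [LawfulBEq κ] [DecidableEq κ] :
    ∀ (M : List κ) (d : PySem.Dict κ ν) (w : ν), (∀ m ∈ M, d.contains m = true) →
      (M.foldl (fun d k => d.insert k w) d).items =
        d.items.map (fun p => if p.1 ∈ M then (p.1, w) else p) := by
  intro M
  induction M with
  | nil =>
    intro d w _
    simp
  | cons m M ih =>
    intro d w h
    have hm : d.contains m = true := h m List.mem_cons_self
    have hcont : ∀ m' ∈ M, (d.insert m w).contains m' = true := by
      intro m' hm'
      rw [PySem.Dict.contains_insert]
      rw [h m' (List.mem_cons_of_mem _ hm')]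
      simp
    have : (m :: M).foldl (fun d k => d.insert k w) d
        = M.foldl (fun d k => d.insert k w) (d.insert m w) := rfl
    rw [this, ih _ w hcont, PySem.Dict.items_insert_of_contains d w hm, List.map_map]
    refine List.map_congr_left ?_
    intro p _
    simp only [Function.comp]
    by_cases h1 : p.1 = m
    · subst h1
      simp only [BEq.rfl, if_true, List.mem_cons, true_or, if_pos]
      by_cases h2 : p.1 ∈ M <;> simp [h2]
    · have : (p.1 == m) = false := by simp [h1]
      rw [this]
      simp only [Bool.false_eq_true, if_false, List.mem_cons]
      by_cases h2 : p.1 ∈ M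
      · simp [h2]
      · simp [h1, h2]

theorem nodup_KsL (g : List (List Int)) (r : Int) : (KsL g r).Nodup :=
  (nodup_cellsL g).filter _

theorem labels_keys {g : List (List Int)} {r : Int} {d : PySem.Dict (Int × Int) (Int × Int)}
    {f : (Int × Int) → (Int × Int)}
    (h : d.items = (KsL g r).map (fun k => (k, f k))) : d.keys = KsL g r := by
  show d.items.map Prod.fst = _
  rw [h, List.map_map]
  rw [List.map_congr_left (fun a _ => rfl : ∀ a ∈ KsL g r, (Prod.fst ∘ fun k => (k, f k)) a = id a)]
  exact List.map_id _

theorem labels_getD {g : List (List Int)} {r : Int} {d : PySem.Dict (Int × Int) (Int × Int)}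
    {f : (Int × Int) → (Int × Int)}
    (h : d.items = (KsL g r).map (fun k => (k, f k))) {k : Int × Int} (hk : k ∈ KsL g r)
    (d0 : Int × Int) : d.getD k d0 = f k := by
  refine PySem.Dict.getD_of_mem_items d ?_ ?_ d0
  · rw [h, List.mem_map]
    exact ⟨k, hk, rfl⟩
  · rw [labels_keys h]
    exact nodup_KsL g r

theorem relabel_key {α : Type} [DecidableEq α] {fx fy fc fn : α} (hne : fc ≠ fn) :
    ((if fx = fn then fc else fx) = (if fy = fn then fc else fy)) ↔
      (fx = fy ∨ (fx = fc ∧ fy = fn) ∨ (fx = fn ∧ fy = fc)) := by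
  by_cases hx : fx = fn
  · by_cases hy : fy = fn
    · subst hx; subst hy
      simp
    · subst hx
      rw [if_pos rfl, if_neg hy]
      constructor
      · intro h
        exact Or.inr (Or.inr ⟨rfl, h.symm⟩)
      · rintro (h | ⟨h1, h2⟩ | ⟨h1, h2⟩)
        · exact absurd h.symm hy
        · exact absurd h1.symm hne
        · exact h2.symm
  · by_cases hy : fy = fn
    · subst hy
      rw [if_neg hx, if_pos rfl]
      constructor
      · intro h
        exact Or.inr (Or.inl ⟨h, rfl⟩)
      · rintro (h | ⟨h1, h2⟩ | ⟨h1, h2⟩)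
        · exact absurd h hx
        · exact h1
        · exact absurd h2.symm hne
    · rw [if_neg hx, if_neg hy]
      constructor
      · intro h
        exact Or.inl h
      · rintro (h | ⟨h1, h2⟩ | ⟨h1, h2⟩)
        · exact h
        · exact absurd h2 hy
        · exact absurd h1 hx

theorem merge_edge {g : List (List Int)} {r : Int} {P : List ((Int × Int) × (Int × Int))}
    {lc : PySem.Dict (Int × Int) (Int × Int) × PySem.Dict (Int × Int) (List (Int × Int))}
    {c n : Int × Int} (hc : c ∈ KsL g r) (hinv : BinvP g r P lc) :
    BinvP g r (P ++ if safeB g r n then [(c, n)] else []) (pvMergeStep lc c n) := by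
  obtain ⟨f, hitems, hknd, hkeysiff, hmem, hnod, heqv⟩ := hinv
  have hlkeys : lc.1.keys = KsL g r := labels_keys hitems
  have hcontains : ∀ z, lc.1.contains z = decide (z ∈ KsL g r) := by
    intro z
    rw [PySem.Dict.contains_eq_decide_mem_keys, hlkeys]
  by_cases hn : n ∈ KsL g r
  case neg =>
    have hsafen : safeB g r n = false := by
      cases hx : safeB g r n
      · rfl
      · exact absurd (mem_KsL.2 hx) hn
    rw [hsafen]
    have hcn : lc.1.contains n = false := by
      rw [hcontains n]
      simpa using hn
    have hnostep : pvMergeStep lc c n = lc := by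
      unfold pvMergeStep
      rw [hcn]
      simp
    rw [hnostep]
    simp only [Bool.false_eq_true, if_false, List.append_nil]
    exact ⟨f, hitems, hknd, hkeysiff, hmem, hnod, heqv⟩
  case pos =>
    have hsafen : safeB g r n = true := mem_KsL.1 hn
    rw [hsafen]
    simp only [if_true]
    have hcn : lc.1.contains n = true := by
      rw [hcontains n]
      exact decide_eq_true hn
    have hgc : lc.1.getD c (0, 0) = f c := labels_getD hitems hc (0, 0)
    have hgn : lc.1.getD n (0, 0) = f n := labels_getD hitems hn (0, 0)
    have hsymmRP : ∀ u w, RPrel P u w ↔ RPrel P w u :=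
      fun u w => ⟨fun h => rp_symm h, fun h => rp_symm h⟩
    by_cases heqfcn : f c = f n
    case pos =>
      have hstep : pvMergeStep lc c n = lc := by
        unfold pvMergeStep
        rw [if_pos hcn, hgc, hgn]
        rw [if_neg (by simpa using heqfcn)]
      rw [hstep]
      refine ⟨f, hitems, hknd, hkeysiff, hmem, hnod, ?_⟩
      intro x y hx hy
      rw [rp_snoc]
      constructor
      · intro h
        exact Or.inl ((heqv x y hx hy).1 h)
      · rintro (h | ⟨h1, h2⟩ | ⟨h1, h2⟩)
        · exact (heqv x y hx hy).2 h
        · exact (((heqv x c hx hc).2 h1).trans heqfcn).trans ((heqv n y hn hy).2 h2)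
        · exact (((heqv x n hx hn).2 h1).trans heqfcn.symm).trans ((heqv c y hc hy).2 h2)
    case neg =>
      -- real merge
      set p : (Int × Int) × (Int × Int) :=
        (if (lc.2.getD (f c) []).length < (lc.2.getD (f n) []).length
          then (f n, f c) else (f c, f n)) with hpdef
      have hstep : pvMergeStep lc c n =
          (((lc.2.getD p.2 []).foldl (fun d k => d.insert k p.1) lc.1),
            ((lc.2.insert p.1 ((lc.2.getD p.1 []) ++ (lc.2.getD p.2 []))).erase p.2)) := by
        unfold pvMergeStep
        rw [if_pos hcn, hgc, hgn]
        rw [if_pos (by simpa using heqfcn)]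
      rw [hstep]
      have hp : (p.1 = f c ∧ p.2 = f n) ∨ (p.1 = f n ∧ p.2 = f c) := by
        rw [hpdef]
        by_cases hlen : (lc.2.getD (f c) []).length < (lc.2.getD (f n) []).length
        · rw [if_pos hlen]
          exact Or.inr ⟨rfl, rfl⟩
        · rw [if_neg hlen]
          exact Or.inl ⟨rfl, rfl⟩
      have h12 : p.1 ≠ p.2 := by
        rcases hp with ⟨h1, h2⟩ | ⟨h1, h2⟩
        · rw [h1, h2]; exact heqfcn
        · rw [h1, h2]; exact fun h => heqfcn h.symm
      have hl1mem : p.1 ∈ lc.2.keys := by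
        rcases hp with ⟨h1, _⟩ | ⟨h1, _⟩
        · exact (hkeysiff p.1).2 ⟨c, hc, h1.symm⟩
        · exact (hkeysiff p.1).2 ⟨n, hn, h1.symm⟩
      have hl2mem : p.2 ∈ lc.2.keys := by
        rcases hp with ⟨_, h2⟩ | ⟨_, h2⟩
        · exact (hkeysiff p.2).2 ⟨n, hn, h2.symm⟩
        · exact (hkeysiff p.2).2 ⟨c, hc, h2.symm⟩
      set M : List (Int × Int) := lc.2.getD p.2 [] with hMdef
      set M1 : List (Int × Int) := lc.2.getD p.1 [] with hM1def
      have hM : ∀ x, x ∈ M ↔ x ∈ KsL g r ∧ f x = p.2 := fun x => hmem p.2 x hl2mem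
      have hM1 : ∀ x, x ∈ M1 ↔ x ∈ KsL g r ∧ f x = p.1 := fun x => hmem p.1 x hl1mem
      have hMnd : M.Nodup := hnod p.2 hl2mem
      have hM1nd : M1.Nodup := hnod p.1 hl1mem
      set f' : (Int × Int) → (Int × Int) := fun x => if f x = p.2 then p.1 else f x with hf'def
      -- labels' items
      have hitems' : ((M.foldl (fun d k => d.insert k p.1) lc.1)).items
          = (KsL g r).map (fun k => (k, f' k)) := by
        rw [foldl_insert_items M lc.1 p.1 (by
          intro m hm
          rw [hcontains m]
          exact decide_eq_true ((hM m).1 hm).1)]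
        rw [hitems, List.map_map]
        refine List.map_congr_left ?_
        intro k hk
        simp only [Function.comp]
        by_cases hkM : k ∈ M
        · rw [if_pos hkM, hf'def]
          have := ((hM k).1 hkM).2
          simp only [this, if_true]
        · rw [if_neg hkM, hf'def]
          have : ¬ (f k = p.2) := fun h => hkM ((hM k).2 ⟨hk, h⟩)
          simp only [this, if_false]
      -- comps'
      have hcont1 : lc.2.contains p.1 = true := by
        rw [PySem.Dict.contains_eq_decide_mem_keys]
        exact decide_eq_true hl1mem
      have hIns : (lc.2.insert p.1 (M1 ++ M)).items
          = lc.2.items.map (fun q => if q.1 == p.1 then (p.1, M1 ++ M) else q) :=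
        PySem.Dict.items_insert_of_contains _ _ hcont1
      have hEr : ((lc.2.insert p.1 (M1 ++ M)).erase p.2).items
          = ((lc.2.insert p.1 (M1 ++ M)).items).filter (fun q => !(q.1 == p.2)) := rfl
      have hfst : ∀ q : (Int × Int) × List (Int × Int),
          ((fun q => if q.1 == p.1 then (p.1, M1 ++ M) else q) q).1 = q.1 := by
        intro q
        by_cases hq : q.1 = p.1
        · simp [hq]
        · simp [hq]
      have hkeys' : ((lc.2.insert p.1 (M1 ++ M)).erase p.2).keys
          = lc.2.keys.filter (fun k => !(k == p.2)) := by
        show (((lc.2.insert p.1 (M1 ++ M)).erase p.2).items).map Prod.fst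
          = (lc.2.items.map Prod.fst).filter (fun k => !(k == p.2))
        rw [hEr, hIns, List.filter_map, List.map_map, List.filter_map]
        rw [show ((fun q : (Int × Int) × List (Int × Int) => !(q.1 == p.2)) ∘
            (fun q : (Int × Int) × List (Int × Int) =>
              if q.1 == p.1 then (p.1, M1 ++ M) else q))
            = ((fun k : Int × Int => !(k == p.2)) ∘ Prod.fst) from
          funext (fun q => by simp only [Function.comp_apply, hfst q])]
        congr 1
        exact funext hfst
      have hknd' : ((lc.2.insert p.1 (M1 ++ M)).erase p.2).keys.Nodup := by
        rw [hkeys']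
        exact hknd.filter _
      have hmemk' : ∀ l, l ∈ ((lc.2.insert p.1 (M1 ++ M)).erase p.2).keys ↔
          l ∈ lc.2.keys ∧ l ≠ p.2 := by
        intro l
        rw [hkeys', List.mem_filter]
        simp
      -- getD of comps'
      have hgd1 : ((lc.2.insert p.1 (M1 ++ M)).erase p.2).getD p.1 [] = M1 ++ M := by
        refine PySem.Dict.getD_of_mem_items _ ?_ hknd' []
        rw [hEr, List.mem_filter, hIns, List.mem_map]
        constructor
        · obtain ⟨q, hq, hq1⟩ := List.mem_map.1 (show p.1 ∈ lc.2.items.map Prod.fst from hl1mem)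
          refine ⟨q, hq, ?_⟩
          rw [if_pos (by simp [hq1])]
        · simp [h12]
      have hgdother : ∀ l, l ∈ lc.2.keys → l ≠ p.1 → l ≠ p.2 →
          ((lc.2.insert p.1 (M1 ++ M)).erase p.2).getD l [] = lc.2.getD l [] := by
        intro l hl hne1 hne2
        obtain ⟨q, hq, hq1⟩ := List.mem_map.1 (show l ∈ lc.2.items.map Prod.fst from hl)
        have hqpair : q = (l, q.2) := by
          cases q
          simp only at hq1
          rw [hq1]
        have hq' : (l, q.2) ∈ lc.2.items := by
          rw [← hqpair]
          exact hq
        have hlv : lc.2.getD l [] = q.2 :=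
          PySem.Dict.getD_of_mem_items _ hq' hknd []
        rw [hlv]
        refine PySem.Dict.getD_of_mem_items _ ?_ hknd' []
        rw [hEr, List.mem_filter, hIns, List.mem_map]
        constructor
        · refine ⟨q, hq, ?_⟩
          rw [if_neg (by simp [hq1, hne1]), hqpair]
        · simp [hne2]
      refine ⟨f', hitems', hknd', ?_, ?_, ?_, ?_⟩
      · -- keys iff
        intro l
        rw [hmemk']
        constructor
        · rintro ⟨hl, hne2⟩
          obtain ⟨k, hk, hfk⟩ := (hkeysiff l).1 hl
          refine ⟨k, hk, ?_⟩
          rw [hf'def]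
          simp only
          rw [if_neg (by rw [hfk]; exact hne2)]
          exact hfk
        · rintro ⟨k, hk, hf'k⟩
          rw [hf'def] at hf'k
          simp only at hf'k
          by_cases hfk2 : f k = p.2
          · rw [if_pos hfk2] at hf'k
            rw [← hf'k]
            exact ⟨hl1mem, h12⟩
          · rw [if_neg hfk2] at hf'k
            refine ⟨(hkeysiff l).2 ⟨k, hk, hf'k⟩, ?_⟩
            rw [← hf'k]
            exact hfk2
      · -- membership of getD
        intro l x hl
        rw [hmemk'] at hl
        obtain ⟨hlk, hlne2⟩ := hl
        by_cases hl1 : l = p.1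
        · subst hl1
          rw [hgd1, List.mem_append, hM1 x, hM x]
          constructor
          · rintro (⟨h1, h2⟩ | ⟨h1, h2⟩)
            · refine ⟨h1, ?_⟩
              rw [hf'def]
              simp only
              rw [if_neg (by rw [h2]; exact h12), h2]
            · refine ⟨h1, ?_⟩
              rw [hf'def]
              simp only
              rw [if_pos h2]
          · rintro ⟨h1, h2⟩
            rw [hf'def] at h2
            simp only at h2
            by_cases hx2 : f x = p.2
            · exact Or.inr ⟨h1, hx2⟩
            · rw [if_neg hx2] at h2
              exact Or.inl ⟨h1, h2⟩
        · rw [hgdother l hlk hl1 hlne2, hmem l x hlk]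
          constructor
          · rintro ⟨h1, h2⟩
            refine ⟨h1, ?_⟩
            rw [hf'def]
            simp only
            rw [if_neg (by rw [h2]; exact hlne2)]
            exact h2
          · rintro ⟨h1, h2⟩
            rw [hf'def] at h2
            simp only at h2
            by_cases hx2 : f x = p.2
            · rw [if_pos hx2] at h2
              exact absurd h2.symm hl1
            · rw [if_neg hx2] at h2
              exact ⟨h1, h2⟩
      · -- nodup of getD
        intro l hl
        rw [hmemk'] at hl
        obtain ⟨hlk, hlne2⟩ := hl
        by_cases hl1 : l = p.1
        · subst hl1
          rw [hgd1]
          rw [List.nodup_append]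
          refine ⟨hM1nd, hMnd, ?_⟩
          intro a ha b hb
          have h1 := ((hM1 a).1 ha).2
          have h2 := ((hM b).1 hb).2
          intro hab
          rw [hab, h2] at h1
          exact h12 h1.symm
        · rw [hgdother l hlk hl1 hlne2]
          exact hnod l hlk
      · -- equivalence
        intro x y hx hy
        rw [rp_snoc]
        have e1 : RPrel P x y ↔ f x = f y := (heqv x y hx hy).symm
        have e2 : RPrel P x c ↔ f x = f c := (heqv x c hx hc).symm
        have e3 : RPrel P n y ↔ f n = f y := (heqv n y hn hy).symm
        have e4 : RPrel P x n ↔ f x = f n := (heqv x n hx hn).symm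
        have e5 : RPrel P c y ↔ f c = f y := (heqv c y hc hy).symm
        rw [e1, e2, e3, e4, e5]
        rw [hf'def]
        simp only
        rcases hp with ⟨hp1, hp2⟩ | ⟨hp1, hp2⟩
        · rw [hp1, hp2]
          rw [relabel_key heqfcn]
          constructor
          · rintro (h | ⟨h1, h2⟩ | ⟨h1, h2⟩)
            · exact Or.inl h
            · exact Or.inr (Or.inl ⟨h1, h2.symm⟩)
            · exact Or.inr (Or.inr ⟨h1, h2.symm⟩)
          · rintro (h | ⟨h1, h2⟩ | ⟨h1, h2⟩)
            · exact Or.inl h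
            · exact Or.inr (Or.inl ⟨h1, h2.symm⟩)
            · exact Or.inr (Or.inr ⟨h1, h2.symm⟩)
        · rw [hp1, hp2]
          rw [relabel_key (fun h => heqfcn h.symm)]
          constructor
          · rintro (h | ⟨h1, h2⟩ | ⟨h1, h2⟩)
            · exact Or.inl h
            · exact Or.inr (Or.inr ⟨h1, h2.symm⟩)
            · exact Or.inr (Or.inl ⟨h1, h2.symm⟩)
          · rintro (h | ⟨h1, h2⟩ | ⟨h1, h2⟩)
            · exact Or.inl h
            · exact Or.inr (Or.inr ⟨h1, h2.symm⟩)
            · exact Or.inr (Or.inl ⟨h1, h2.symm⟩)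

theorem build_go {g : List (List Int)} {r : Int} :
    ∀ (l pfx : List (Int × Int))
      (lc : PySem.Dict (Int × Int) (Int × Int) × PySem.Dict (Int × Int) (List (Int × Int))),
      cellsL g = pfx ++ l →
      lc.1.items = (pfx.filter (safeB g r)).map (fun k => (k, k)) →
      lc.2.items = (pfx.filter (safeB g r)).map (fun k => (k, [k])) →
      (l.foldl (fun lc c =>
          if r < (g.getD c.1.toNat []).getD c.2.toNat 0 then
            (lc.1.insert c c, lc.2.insert c [c])
          else lc) lc).1.items = (((pfx ++ l).filter (safeB g r)).map (fun k => (k, k))) ∧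
      (l.foldl (fun lc c =>
          if r < (g.getD c.1.toNat []).getD c.2.toNat 0 then
            (lc.1.insert c c, lc.2.insert c [c])
          else lc) lc).2.items = (((pfx ++ l).filter (safeB g r)).map (fun k => (k, [k]))) := by
  intro l
  induction l with
  | nil =>
    intro pfx lc _ h1 h2
    simpa using ⟨h1, h2⟩
  | cons c tl ih =>
    intro pfx lc hdec h1 h2
    have hcin : inB g c := mem_cellsL.1 (by rw [hdec]; exact List.mem_append_right _ List.mem_cons_self)
    have hcpfx : c ∉ pfx := by
      have hnd := nodup_cellsL g
      rw [hdec] at hnd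
      intro hc
      rcases List.nodup_append.1 hnd with ⟨_, _, hdisj⟩
      exact hdisj c hc c List.mem_cons_self rfl
    by_cases hval : r < (g.getD c.1.toNat []).getD c.2.toNat 0
    · have hcsafe : safeB g r c = true := safeB_iff.2 ⟨hcin, hval⟩
      have hkeys1 : lc.1.keys = pfx.filter (safeB g r) := by
        show lc.1.items.map Prod.fst = _
        rw [h1, List.map_map]
        rw [List.map_congr_left (fun a _ => rfl :
          ∀ a ∈ pfx.filter (safeB g r), (Prod.fst ∘ fun k => (k, k)) a = id a)]
        exact List.map_id _
      have hkeys2 : lc.2.keys = pfx.filter (safeB g r) := by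
        show lc.2.items.map Prod.fst = _
        rw [h2, List.map_map]
        rw [List.map_congr_left (fun a _ => rfl :
          ∀ a ∈ pfx.filter (safeB g r), (Prod.fst ∘ fun k => (k, [k])) a = id a)]
        exact List.map_id _
      have hcont1 : lc.1.contains c = false := by
        rw [PySem.Dict.contains_eq_decide_mem_keys, hkeys1]
        simp only [decide_eq_false_iff_not, List.mem_filter]
        intro h
        exact hcpfx h.1
      have hcont2 : lc.2.contains c = false := by
        rw [PySem.Dict.contains_eq_decide_mem_keys, hkeys2]
        simp only [decide_eq_false_iff_not, List.mem_filter]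
        intro h
        exact hcpfx h.1
      have hstep : (c :: tl).foldl (fun lc c =>
          if r < (g.getD c.1.toNat []).getD c.2.toNat 0 then
            (lc.1.insert c c, lc.2.insert c [c])
          else lc) lc
          = tl.foldl (fun lc (c : Int × Int) =>
          if r < (g.getD c.1.toNat []).getD c.2.toNat 0 then
            (lc.1.insert c c, lc.2.insert c [c])
          else lc) (lc.1.insert c c, lc.2.insert c [c]) := by
        show List.foldl _ (if r < (g.getD c.1.toNat []).getD c.2.toNat 0 then _ else lc) tl = _
        rw [if_pos hval]
      rw [hstep]
      have hres := ih (pfx ++ [c]) (lc.1.insert c c, lc.2.insert c [c])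
        (by rw [hdec]; simp)
        (by
          show (lc.1.insert c c).items = _
          rw [PySem.Dict.items_insert_of_not_contains _ _ hcont1, h1]
          rw [List.filter_append, List.filter_cons, hcsafe, List.filter_nil, List.map_append]
          rfl)
        (by
          show (lc.2.insert c [c]).items = _
          rw [PySem.Dict.items_insert_of_not_contains _ _ hcont2, h2]
          rw [List.filter_append, List.filter_cons, hcsafe, List.filter_nil, List.map_append]
          rfl)
      rw [hres.1, hres.2]
      constructor <;> · congr 1; simp
    · have hcsafe : safeB g r c = false := by
        cases hx : safeB g r c
        · rfl
        · exact absurd (safeB_iff.1 hx).2 hval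
      have hstep : (c :: tl).foldl (fun lc c =>
          if r < (g.getD c.1.toNat []).getD c.2.toNat 0 then
            (lc.1.insert c c, lc.2.insert c [c])
          else lc) lc
          = tl.foldl (fun lc (c : Int × Int) =>
          if r < (g.getD c.1.toNat []).getD c.2.toNat 0 then
            (lc.1.insert c c, lc.2.insert c [c])
          else lc) lc := by
        show List.foldl _ (if r < (g.getD c.1.toNat []).getD c.2.toNat 0 then _ else lc) tl = _
        rw [if_neg hval]
      rw [hstep]
      have hres := ih (pfx ++ [c]) lc
        (by rw [hdec]; simp)
        (by rw [h1, List.filter_append, List.filter_cons, hcsafe]; simp)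
        (by rw [h2, List.filter_append, List.filter_cons, hcsafe]; simp)
      rw [hres.1, hres.2]
      constructor <;> · congr 1; simp

theorem build_spec {g : List (List Int)} {r : Int} :
    BinvP g r []
      ((PySem.List.pyRange 0 (g.length : Int) 1).foldl (fun lc i =>
        (PySem.List.pyRange 0 (colsN g : Int) 1).foldl
          (fun (lc : PySem.Dict (Int × Int) (Int × Int) × PySem.Dict (Int × Int) (List (Int × Int))) j =>
            if r < (g.getD i.toNat []).getD j.toNat 0 then
              (lc.1.insert (i, j) (i, j), lc.2.insert (i, j) [(i, j)])
            else lc) lc) (PySem.Dict.empty, PySem.Dict.empty)) := by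
  have hflat : ((PySem.List.pyRange 0 (g.length : Int) 1).foldl (fun lc i =>
      (PySem.List.pyRange 0 (colsN g : Int) 1).foldl
        (fun (lc : PySem.Dict (Int × Int) (Int × Int) × PySem.Dict (Int × Int) (List (Int × Int))) j =>
          if r < (g.getD i.toNat []).getD j.toNat 0 then
            (lc.1.insert (i, j) (i, j), lc.2.insert (i, j) [(i, j)])
          else lc) lc) (PySem.Dict.empty, PySem.Dict.empty))
      = ((cellsL g).foldl (fun lc c =>
          if r < (g.getD c.1.toNat []).getD c.2.toNat 0 then
            (lc.1.insert c c, lc.2.insert c [c])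
          else lc) (PySem.Dict.empty, PySem.Dict.empty)) := by
    rw [cellsL, List.foldl_flatMap]
    simp only [List.foldl_map]
  rw [hflat]
  have hres := build_go (g := g) (r := r) (cellsL g) [] (PySem.Dict.empty, PySem.Dict.empty)
    (by simp) (by rfl) (by rfl)
  rw [List.nil_append] at hres
  set Z := ((cellsL g).foldl (fun lc c =>
      if r < (g.getD c.1.toNat []).getD c.2.toNat 0 then
        (lc.1.insert c c, lc.2.insert c [c])
      else lc) (PySem.Dict.empty, PySem.Dict.empty)) with hZ
  have h1 : Z.1.items = (KsL g r).map (fun k => (k, k)) := hres.1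
  have h2 : Z.2.items = (KsL g r).map (fun k => (k, [k])) := hres.2
  have hkeys : Z.2.keys = KsL g r := by
    show Z.2.items.map Prod.fst = _
    rw [h2, List.map_map]
    rw [List.map_congr_left (fun a _ => rfl :
      ∀ a ∈ KsL g r, (Prod.fst ∘ fun k => (k, [k])) a = id a)]
    exact List.map_id _
  have hknd : Z.2.keys.Nodup := by
    rw [hkeys]
    exact nodup_KsL g r
  refine ⟨fun k => k, h1, hknd, ?_, ?_, ?_, ?_⟩
  · intro l
    rw [hkeys]
    constructor
    · intro h
      exact ⟨l, h, rfl⟩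
    · rintro ⟨k, hk, rfl⟩
      exact hk
  · intro l x hl
    rw [hkeys] at hl
    have hgd : Z.2.getD l [] = [l] := by
      refine PySem.Dict.getD_of_mem_items _ ?_ hknd []
      rw [h2, List.mem_map]
      exact ⟨l, hl, rfl⟩
    rw [hgd]
    simp only [List.mem_singleton]
    constructor
    · rintro rfl
      exact ⟨hl, rfl⟩
    · rintro ⟨_, rfl⟩
      rfl
  · intro l hl
    rw [hkeys] at hl
    have hgd : Z.2.getD l [] = [l] := by
      refine PySem.Dict.getD_of_mem_items _ ?_ hknd []
      rw [h2, List.mem_map]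
      exact ⟨l, hl, rfl⟩
    rw [hgd]
    simp
  · intro x y _ _
    exact rp_nil.symm

theorem mem_edgesOf {g : List (List Int)} {r : Int} {L : List (Int × Int)} {x y : Int × Int} :
    (x, y) ∈ edgesOf g r L ↔
      x ∈ L ∧ safeB g r x = true ∧ safeB g r y = true ∧ y ∈ pvNbrs2 x := by
  simp only [edgesOf, List.mem_flatMap]
  constructor
  · rintro ⟨c, hc, hmem⟩
    by_cases hs : safeB g r c = true
    · rw [if_pos hs] at hmem
      rw [List.mem_map] at hmem
      obtain ⟨n, hn, heq⟩ := hmem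
      have hx : c = x := congrArg Prod.fst heq
      have hy : n = y := congrArg Prod.snd heq
      subst hx; subst hy
      have := List.mem_filter.1 hn
      exact ⟨hc, hs, this.2, this.1⟩
    · rw [if_neg hs] at hmem
      cases hmem
  · rintro ⟨hxL, hsx, hsy, hnb⟩
    refine ⟨x, hxL, ?_⟩
    rw [if_pos hsx, List.mem_map]
    exact ⟨y, List.mem_filter.2 ⟨hnb, hsy⟩, rfl⟩

theorem edges_iff_EC {g : List (List Int)} {r : Int} {a b : Int × Int} :
    ((a, b) ∈ edgesOf g r (cellsL g) ∨ (b, a) ∈ edgesOf g r (cellsL g)) ↔ EC g r a b := by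
  rw [mem_edgesOf, mem_edgesOf]
  constructor
  · rintro (⟨_, hsa, hsb, hnb⟩ | ⟨_, hsb, hsa, hnb⟩)
    · refine ⟨hsa, hsb, ?_⟩
      simp only [pvNbrs2, List.mem_cons, List.not_mem_nil, or_false] at hnb
      unfold adjC
      tauto
    · refine ⟨hsa, hsb, ?_⟩
      simp only [pvNbrs2, List.mem_cons, List.not_mem_nil, or_false] at hnb
      unfold adjC
      cases a with | mk a1 a2 =>
      cases b with | mk b1 b2 =>
      simp only [Prod.mk.injEq] at hnb ⊢
      omega
  · rintro ⟨hsa, hsb, hadj⟩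
    have hamem : a ∈ cellsL g := mem_cellsL.2 (safeB_iff.1 hsa).1
    have hbmem : b ∈ cellsL g := mem_cellsL.2 (safeB_iff.1 hsb).1
    cases a with | mk a1 a2 =>
    cases b with | mk b1 b2 =>
    simp only [adjC, Prod.mk.injEq] at hadj
    simp only [pvNbrs2, List.mem_cons, List.not_mem_nil, or_false, Prod.mk.injEq]
    rcases hadj with ⟨h1, h2⟩ | ⟨h1, h2⟩ | ⟨h1, h2⟩ | ⟨h1, h2⟩
    · exact Or.inl ⟨hamem, hsa, hsb, Or.inl ⟨by omega, by omega⟩⟩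
    · exact Or.inr ⟨hbmem, hsb, hsa, Or.inl ⟨by omega, by omega⟩⟩
    · exact Or.inl ⟨hamem, hsa, hsb, Or.inr ⟨by omega, by omega⟩⟩
    · exact Or.inr ⟨hbmem, hsb, hsa, Or.inr ⟨by omega, by omega⟩⟩

theorem edgesOf_append {g : List (List Int)} {r : Int} (l1 l2 : List (Int × Int)) :
    edgesOf g r (l1 ++ l2) = edgesOf g r l1 ++ edgesOf g r l2 := by
  unfold edgesOf
  rw [List.flatMap_append]

theorem merge_go {g : List (List Int)} {r : Int} :
    ∀ (l pfx : List (Int × Int))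
      (lc : PySem.Dict (Int × Int) (Int × Int) × PySem.Dict (Int × Int) (List (Int × Int))),
      cellsL g = pfx ++ l → BinvP g r (edgesOf g r pfx) lc →
      BinvP g r (edgesOf g r (pfx ++ l))
        (l.foldl (fun lc c =>
          if lc.1.contains c then
            (pvNbrs2 c).foldl (fun lc n => pvMergeStep lc c n) lc
          else lc) lc) := by
  intro l
  induction l with
  | nil =>
    intro pfx lc _ hI
    simpa using hI
  | cons c tl ih =>
    intro pfx lc hdec hI
    have hI' := hI
    obtain ⟨f, hitems, _⟩ := hI'
    have hcontains : lc.1.contains c = decide (c ∈ KsL g r) := by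
      rw [PySem.Dict.contains_eq_decide_mem_keys, labels_keys hitems]
    have hstep : (c :: tl).foldl (fun lc c =>
        if lc.1.contains c then
          (pvNbrs2 c).foldl (fun lc n => pvMergeStep lc c n) lc
        else lc) lc
        = tl.foldl (fun lc c =>
            if lc.1.contains c then
              (pvNbrs2 c).foldl (fun lc n => pvMergeStep lc c n) lc
            else lc)
          (if lc.1.contains c then
            (pvNbrs2 c).foldl (fun lc n => pvMergeStep lc c n) lc
          else lc) := rfl
    rw [hstep]
    by_cases hcK : c ∈ KsL g r
    · have hct : lc.1.contains c = true := by
        rw [hcontains]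
        exact decide_eq_true hcK
      rw [if_pos hct]
      have h1 := merge_edge (n := (c.1 + 1, c.2)) hcK hI
      have h2 := merge_edge (n := (c.1, c.2 + 1)) hcK h1
      have hinner : (pvNbrs2 c).foldl (fun lc n => pvMergeStep lc c n) lc
          = pvMergeStep (pvMergeStep lc c (c.1 + 1, c.2)) c (c.1, c.2 + 1) := rfl
      rw [hinner]
      have hedge : edgesOf g r (pfx ++ [c]) = (edgesOf g r pfx ++
          (if safeB g r (c.1 + 1, c.2) then [(c, (c.1 + 1, c.2))] else [])) ++
          (if safeB g r (c.1, c.2 + 1) then [(c, (c.1, c.2 + 1))] else []) := by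
        rw [edgesOf_append, List.append_assoc]
        congr 1
        unfold edgesOf
        rw [List.flatMap_cons, List.flatMap_nil, List.append_nil]
        rw [if_pos (mem_KsL.1 hcK)]
        unfold pvNbrs2
        by_cases hn1 : safeB g r (c.1 + 1, c.2) = true <;>
          by_cases hn2 : safeB g r (c.1, c.2 + 1) = true <;>
            simp [List.filter_cons, hn1, hn2]
      have hres := ih (pfx ++ [c]) _ (by rw [hdec]; simp) (by rw [hedge]; exact h2)
      rw [show pfx ++ c :: tl = (pfx ++ [c]) ++ tl by simp]
      exact hres
    · have hcf : lc.1.contains c = false := by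
        rw [hcontains]
        simpa using hcK
      rw [if_neg (by rw [hcf]; exact Bool.false_ne_true)]
      have hsafec : safeB g r c = false := by
        cases hx : safeB g r c
        · rfl
        · exact absurd (mem_KsL.2 hx) hcK
      have hedge : edgesOf g r (pfx ++ [c]) = edgesOf g r pfx := by
        rw [edgesOf_append]
        unfold edgesOf
        rw [List.flatMap_cons, List.flatMap_nil, List.append_nil]
        rw [if_neg (by rw [hsafec]; exact Bool.false_ne_true)]
        rw [List.append_nil]
      have hres := ih (pfx ++ [c]) lc (by rw [hdec]; simp)
        (by rw [hedge]; exact hI)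
      rw [show pfx ++ c :: tl = (pfx ++ [c]) ++ tl by simp]
      exact hres

theorem safeAreas_alt_eq_card {g : List (List Int)} {r : Int} (hg : g ≠ []) :
    ∃ f : (Int × Int) → (Int × Int),
      (∀ x y, x ∈ KsL g r → y ∈ KsL g r → (f x = f y ↔ Conn g r x y)) ∧
      safeAreas_alt g r = ((((KsL g r).map f).toFinset.card : Int)) := by
  set D0 := ((PySem.List.pyRange 0 (g.length : Int) 1).foldl (fun lc i =>
      (PySem.List.pyRange 0 (colsN g : Int) 1).foldl
        (fun (lc : PySem.Dict (Int × Int) (Int × Int) × PySem.Dict (Int × Int) (List (Int × Int))) j =>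
          if r < (g.getD i.toNat []).getD j.toNat 0 then
            (lc.1.insert (i, j) (i, j), lc.2.insert (i, j) [(i, j)])
          else lc) lc) (PySem.Dict.empty, PySem.Dict.empty)) with hD0
  set D1 := ((PySem.List.pyRange 0 (g.length : Int) 1).foldl (fun lc i =>
      (PySem.List.pyRange 0 (colsN g : Int) 1).foldl (fun lc j =>
        if lc.1.contains (i, j) then
          (pvNbrs2 (i, j)).foldl (fun lc n => pvMergeStep lc (i, j) n) lc
        else lc) lc) D0) with hD1
  have hval : safeAreas_alt g r = (D1.2.size : Int) := by
    rw [safeAreas_alt, if_neg hg]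
    rfl
  have hflat2 : D1 = (cellsL g).foldl (fun lc c =>
      if lc.1.contains c then
        (pvNbrs2 c).foldl (fun lc n => pvMergeStep lc c n) lc
      else lc) D0 := by
    rw [hD1, cellsL, List.foldl_flatMap]
    simp only [List.foldl_map]
  have hB0 : BinvP g r [] D0 := build_spec
  have hBfin := merge_go (cellsL g) [] D0 (by simp) hB0
  rw [List.nil_append, ← hflat2] at hBfin
  obtain ⟨f, hitems, hknd, hkeysiff, hmem, hnod, heqv⟩ := hBfin
  refine ⟨f, ?_, ?_⟩
  · intro x y hx hy
    rw [heqv x y hx hy]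
    exact rtg_congr (fun a b => edges_iff_EC)
  · rw [hval]
    have hkeyslen : D1.2.keys.length = D1.2.size := by
      show (List.map (fun x => x.1) D1.2.items).length = D1.2.items.length
      rw [List.length_map]
    have htf : D1.2.keys.toFinset = ((KsL g r).map f).toFinset := by
      ext a
      rw [List.mem_toFinset, List.mem_toFinset, hkeysiff a, List.mem_map]
    have : D1.2.size = ((KsL g r).map f).toFinset.card := by
      rw [← hkeyslen, ← List.toFinset_card_of_nodup hknd, htf]
    rw [this]

-- ===== VERDICT (by name: the statement is the Claim_ definition above) =====
theorem safeAreas_spec : Claim_equal_safeAreas := by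
  intro grid rain _ _
  unfold Spec_safeAreas
  by_cases hg : grid = []
  · subst hg; rfl
  · obtain ⟨f, hf, hB⟩ := safeAreas_alt_eq_card (g := grid) (r := rain) hg
    rw [hB]
    exact safeAreas_eq_card hg (fun x y hx hy => hf x y (mem_KsL.2 hx) (mem_KsL.2 hy))
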